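-- pv_equiv track=rewrite | github.com/jkling2/google-hash-code-2020 | test/test.py | getRegisteredLibsAndTimes
-- ===== SOURCE A (Python) =====
-- def getRegisteredLibsAndTimes(signUpTimes, outputData, days):
--     registeredLibsAtTime = {}
--     currentTime = 0
--     for index, lib in enumerate(outputData):
--         libId = lib[0]
--         neededTime = signUpTimes[libId]
--         currentTime += neededTime
--         if currentTime >= days:
--             break
--         registeredLibsAtTime.update({libId : currentTime})
--     return registeredLibsAtTime
-- ===== SOURCE B (Python) =====
-- def getRegisteredLibsAndTimes(signUpTimes, outputData, days):
--     # pass 1: count the leading libraries whose cumulative signup time stays strictly below days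
--     k = 0
--     t = 0
--     for lib in outputData:
--         t += signUpTimes[lib[0]]
--         if t >= days:
--             break
--         k += 1
--     # pass 2: materialise ids and prefix sums for those k libraries and zip them into the dict
--     kept = outputData[:k]
--     ids = [lib[0] for lib in kept]
--     sums = []
--     t = 0
--     for lib in kept:
--         t += signUpTimes[lib[0]]
--         sums.append(t)
--     return dict(zip(ids, sums))
-- ===== Notes on version B (the rewrite author's own statement) =====
-- stated objective: alternative
-- what changed: B splits A's fused loop into two passes: first it only counts how many leading libraries stay strictly below the deadline, then it materialises the id list and the prefix-sum list over that slice and zips them into the result dict, instead of A's single loop that inserts while accumulating.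
import Mathlib
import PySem

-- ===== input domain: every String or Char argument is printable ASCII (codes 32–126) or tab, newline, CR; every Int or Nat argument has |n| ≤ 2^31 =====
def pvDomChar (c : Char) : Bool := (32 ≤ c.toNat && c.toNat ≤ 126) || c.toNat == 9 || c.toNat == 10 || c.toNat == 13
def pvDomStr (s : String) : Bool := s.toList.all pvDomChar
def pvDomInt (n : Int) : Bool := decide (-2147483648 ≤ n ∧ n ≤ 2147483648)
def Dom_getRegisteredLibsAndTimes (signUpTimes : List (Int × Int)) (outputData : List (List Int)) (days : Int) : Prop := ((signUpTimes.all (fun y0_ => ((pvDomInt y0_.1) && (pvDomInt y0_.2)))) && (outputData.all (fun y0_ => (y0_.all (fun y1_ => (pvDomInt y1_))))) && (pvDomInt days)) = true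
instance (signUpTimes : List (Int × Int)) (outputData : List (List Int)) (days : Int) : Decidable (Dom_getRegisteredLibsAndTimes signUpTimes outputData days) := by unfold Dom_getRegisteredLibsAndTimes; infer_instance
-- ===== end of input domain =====

-- B splits A's fused loop in two: pass 1 counts the leading libraries below the deadline, pass 2
-- materialises ids and prefix sums over that slice and zips them into the dict (alternative
-- decomposition); both raise on the same inputs, so Pre_ is exactly where A (and B) return.


-- shared helper: the library id of an entry (lib[0]; 0 stands in for the IndexError of an empty
-- entry, which Pre_ rules out at every position the programs read)
def pvIdOf (lib : List Int) : Int :=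
  match PySem.List.pyGet? lib 0 with
  | some v => v
  | none => 0

-- ===== PORT A =====
-- A's fused loop: accumulate currentTime, break at the first cumulative time >= days, insert
-- otherwise.  Where Python A raises (empty lib: IndexError; missing id: KeyError) the input is
-- outside Pre_; there the port stops with the dict so far / uses default 0.
def pvGoA (sd : PySem.Dict Int Int) (days : Int) : PySem.Dict Int Int → Int → List (List Int) → PySem.Dict Int Int
  | d, _, [] => d
  | d, t, lib :: rest =>
    match PySem.List.pyGet? lib 0 with
    | none => d            -- IndexError in Python (outside Pre_)
    | some libId =>
      let t' := t + (sd.get? libId).getD 0   -- KeyError in Python when missing (outside Pre_)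
      if days ≤ t' then d else pvGoA sd days (d.insert libId t') t' rest

def getRegisteredLibsAndTimes (signUpTimes : List (Int × Int)) (outputData : List (List Int)) (days : Int) : List (Int × Int) :=
  (pvGoA (PySem.Dict.mk signUpTimes) days PySem.Dict.empty 0 outputData).items

-- ===== PORT B =====
-- pass 1: k = number of leading libraries whose cumulative signup time stays strictly below days
-- (same raises as A outside Pre_; the returned count is then unused)
def pvFindKB (sd : PySem.Dict Int Int) (days : Int) : Int → List (List Int) → Nat
  | _, [] => 0
  | t, lib :: rest =>
    match PySem.List.pyGet? lib 0 with
    | none => 0            -- IndexError in Python (outside Pre_)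
    | some libId =>
      let t' := t + (sd.get? libId).getD 0   -- KeyError in Python when missing (outside Pre_)
      if days ≤ t' then 0 else pvFindKB sd days t' rest + 1

-- pass 2 prefix-sum loop over the kept slice (ids read via pvIdOf, times via getD 0; inside Pre_
-- every kept entry is nonempty with a known id)
def pvSumsB (sd : PySem.Dict Int Int) (libs : List (List Int)) : List Int :=
  (libs.foldl (fun (acc : List Int × Int) lib =>
      (acc.1 ++ [acc.2 + (sd.get? (pvIdOf lib)).getD 0], acc.2 + (sd.get? (pvIdOf lib)).getD 0)) ([], 0)).1

def getRegisteredLibsAndTimes_alt (signUpTimes : List (Int × Int)) (outputData : List (List Int)) (days : Int) : List (Int × Int) :=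
  let sd := PySem.Dict.mk signUpTimes
  let k := pvFindKB sd days 0 outputData
  let kept := outputData.take k              -- outputData[:k], k ≥ 0
  let ids := kept.map pvIdOf                 -- [lib[0] for lib in kept]
  let sums := pvSumsB sd kept
  (PySem.Dict.ofList (List.zip ids sums)).items

-- ===== PRECONDITION & SPEC =====
-- running sum of the first i signup times (missing ids counted 0; exact while entries are valid)
def pvCum (sd : PySem.Dict Int Int) (libs : List (List Int)) (i : Nat) : Int :=
  ((libs.take i).map (fun lib => (sd.get? (pvIdOf lib)).getD 0)).sum

-- Pre_ is exactly the set of inputs on which Python A (and B) return (no IndexError/KeyError):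
-- every entry reached before the running sum first meets the deadline — including the position of
-- the break itself — is nonempty and its id is a key of signUpTimes.
def Pre_getRegisteredLibsAndTimes (signUpTimes : List (Int × Int)) (outputData : List (List Int)) (days : Int) : Prop :=
  ∀ i : Nat, i < outputData.length →
    (∀ j : Nat, j < i → pvCum (PySem.Dict.mk signUpTimes) outputData (j + 1) < days) →
    ((PySem.List.pyGet? (outputData.getD i []) 0).isSome ∧
     ((PySem.Dict.mk signUpTimes).get? (pvIdOf (outputData.getD i []))).isSome)
instance (signUpTimes : List (Int × Int)) (outputData : List (List Int)) (days : Int) : Decidable (Pre_getRegisteredLibsAndTimes signUpTimes outputData days) := by unfold Pre_getRegisteredLibsAndTimes; infer_instance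

def pvWitness_getRegisteredLibsAndTimes : (List (Int × Int)) × List (List Int) × Int :=
  ([(0, 1), (1, 2)], [[0], [1], [0]], 10)

def Spec_getRegisteredLibsAndTimes (signUpTimes : List (Int × Int)) (outputData : List (List Int)) (days : Int) (out : List (Int × Int)) : Prop := out = getRegisteredLibsAndTimes_alt signUpTimes outputData days
instance (signUpTimes : List (Int × Int)) (outputData : List (List Int)) (days : Int) (out : List (Int × Int)) : Decidable (Spec_getRegisteredLibsAndTimes signUpTimes outputData days out) := by unfold Spec_getRegisteredLibsAndTimes; infer_instance

-- ===== CLAIM (what is proved, stated in full; the proofs are below) =====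
def Claim_equal_getRegisteredLibsAndTimes : Prop := ∀ (signUpTimes : List (Int × Int)) (outputData : List (List Int)) (days : Int), Dom_getRegisteredLibsAndTimes signUpTimes outputData days → Pre_getRegisteredLibsAndTimes signUpTimes outputData days → Spec_getRegisteredLibsAndTimes signUpTimes outputData days (getRegisteredLibsAndTimes signUpTimes outputData days)

-- ===== LEMMAS AND PROOFS =====

-- proof-side recursive restatement of the reachability part of Pre_
def pvPreAux (sd : PySem.Dict Int Int) (days : Int) : List (List Int) → Int → Prop
  | [], _ => True
  | lib :: rest, t =>
    (PySem.List.pyGet? lib 0).isSome ∧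
    (t + (sd.get? (pvIdOf lib)).getD 0 < days →
      pvPreAux sd days rest (t + (sd.get? (pvIdOf lib)).getD 0))

theorem pvCum_cons (sd : PySem.Dict Int Int) (lib : List Int) (rest : List (List Int)) (j : Nat) :
    pvCum sd (lib :: rest) (j + 1) = (sd.get? (pvIdOf lib)).getD 0 + pvCum sd rest j := by
  simp [pvCum, List.take_succ_cons]

theorem pvPre_to_aux (sd : PySem.Dict Int Int) (days : Int) (libs : List (List Int)) (t : Int)
    (h : ∀ i : Nat, i < libs.length →
      (∀ j : Nat, j < i → t + pvCum sd libs (j + 1) < days) →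
      (PySem.List.pyGet? (libs.getD i []) 0).isSome) :
    pvPreAux sd days libs t := by
  induction libs generalizing t with
  | nil => trivial
  | cons lib rest ih =>
    refine ⟨h 0 (by simp) (by omega), fun hlt => ?_⟩
    refine ih _ (fun i hi hj => ?_)
    have := h (i + 1) (by simpa using Nat.succ_lt_succ hi) (fun j hjlt => ?_)
    · simpa using this
    · cases j with
      | zero => simpa [pvCum_cons, pvCum] using by linarith [hlt]
      | succ j' =>
        have := hj j' (by omega)
        rw [pvCum_cons]
        linarith [this]

-- the common value stream: the full (libId, cumulativeTime) pair list
def pvPairs (sd : PySem.Dict Int Int) : List (List Int) → Int → List (Int × Int)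
  | [], _ => []
  | lib :: rest, t =>
    let t' := t + (sd.get? (pvIdOf lib)).getD 0
    (pvIdOf lib, t') :: pvPairs sd rest t'

-- A's loop folds exactly the pairs whose cumulative time is strictly below days into the dict
theorem pvGoA_eq (sd : PySem.Dict Int Int) (days : Int) (libs : List (List Int)) (d : PySem.Dict Int Int) (t : Int)
    (h : pvPreAux sd days libs t) :
    pvGoA sd days d t libs = ((pvPairs sd libs t).takeWhile (fun p => decide (p.2 < days))).foldl (fun d p => d.insert p.1 p.2) d := by
  induction libs generalizing d t with
  | nil => rfl
  | cons lib rest ih =>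
    obtain ⟨hsome, hrec⟩ := h
    obtain ⟨libId, hget⟩ := Option.isSome_iff_exists.mp hsome
    have hid : pvIdOf lib = libId := by simp [pvIdOf, hget]
    rw [hid] at hrec
    simp only [pvGoA, pvPairs, hget, hid]
    split_ifs with hd
    · rw [List.takeWhile_cons_of_neg (by simpa using hd)]; rfl
    · rw [List.takeWhile_cons_of_pos (by simpa using not_le.mp hd)]
      simpa using ih _ _ (hrec (by simpa using not_le.mp hd))

-- B's pass 1 counts exactly those pairs
theorem pvFindKB_eq (sd : PySem.Dict Int Int) (days : Int) (libs : List (List Int)) (t : Int)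
    (h : pvPreAux sd days libs t) :
    pvFindKB sd days t libs = ((pvPairs sd libs t).takeWhile (fun p => decide (p.2 < days))).length := by
  induction libs generalizing t with
  | nil => rfl
  | cons lib rest ih =>
    obtain ⟨hsome, hrec⟩ := h
    obtain ⟨libId, hget⟩ := Option.isSome_iff_exists.mp hsome
    have hid : pvIdOf lib = libId := by simp [pvIdOf, hget]
    rw [hid] at hrec
    simp only [pvFindKB, pvPairs, hget, hid]
    split_ifs with hd
    · rw [List.takeWhile_cons_of_neg (by simpa using hd)]; rfl
    · rw [List.takeWhile_cons_of_pos (by simpa using not_le.mp hd)]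
      simpa using ih _ (hrec (by simpa using not_le.mp hd))

-- taking the first k entries of the input takes the first k pairs
theorem pvPairs_take (sd : PySem.Dict Int Int) (libs : List (List Int)) (t : Int) (k : Nat) :
    pvPairs sd (libs.take k) t = (pvPairs sd libs t).take k := by
  induction libs generalizing t k with
  | nil => simp [pvPairs]
  | cons lib rest ih =>
    cases k with
    | zero => simp [pvPairs]
    | succ k => simp [pvPairs, ih]

theorem pvTakeLenTakeWhile {α : Type} (l : List α) (q : α → Bool) :
    l.take (l.takeWhile q).length = l.takeWhile q := by
  induction l with
  | nil => rfl
  | cons x t ih =>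
    by_cases h : q x
    · simp [h, ih]
    · simp [h]

-- B's pass-2 fold produces the second components of pvPairs (appended to the accumulator)
theorem pvFoldB (sd : PySem.Dict Int Int) (libs : List (List Int)) (acc1 : List Int) (t : Int) :
    (libs.foldl (fun (acc : List Int × Int) lib =>
      (acc.1 ++ [acc.2 + (sd.get? (pvIdOf lib)).getD 0], acc.2 + (sd.get? (pvIdOf lib)).getD 0)) (acc1, t)).1
      = acc1 ++ (pvPairs sd libs t).map (·.2) := by
  induction libs generalizing acc1 t with
  | nil => simp [pvPairs]
  | cons lib rest ih =>
    simp only [List.foldl_cons, pvPairs, List.map_cons]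
    rw [ih]
    simp

-- B's ids are the first components of pvPairs (independent of the running time t)
theorem pvMapFst (sd : PySem.Dict Int Int) (libs : List (List Int)) (t : Int) :
    (pvPairs sd libs t).map (·.1) = libs.map pvIdOf := by
  induction libs generalizing t with
  | nil => rfl
  | cons lib rest ih => simp [pvPairs, ih]

theorem getRegisteredLibsAndTimes_spec : Claim_equal_getRegisteredLibsAndTimes := by
  intro signUpTimes outputData days _ hpre
  unfold Spec_getRegisteredLibsAndTimes getRegisteredLibsAndTimes getRegisteredLibsAndTimes_alt
  set sd := PySem.Dict.mk signUpTimes with hsd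
  have haux : pvPreAux sd days outputData 0 := by
    refine pvPre_to_aux sd days outputData 0 (fun i hi hj => (hpre i hi (fun j hjlt => ?_)).1)
    have := hj j hjlt
    simpa using this
  set pairs := pvPairs sd outputData 0 with hpairs
  set kept := pairs.takeWhile (fun p => decide (p.2 < days)) with hkept
  rw [pvGoA_eq sd days outputData PySem.Dict.empty 0 haux]
  show _ = (PySem.Dict.ofList (List.zip ((outputData.take (pvFindKB sd days 0 outputData)).map pvIdOf) (pvSumsB sd (outputData.take (pvFindKB sd days 0 outputData))))).items
  rw [pvFindKB_eq sd days outputData 0 haux]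
  have hkp : pvPairs sd (outputData.take kept.length) 0 = kept := by
    rw [pvPairs_take, ← hpairs, hkept, pvTakeLenTakeWhile]
  have hids : (outputData.take kept.length).map pvIdOf = kept.map (·.1) := by
    rw [← pvMapFst sd (outputData.take kept.length) 0, hkp]
  have hsums : pvSumsB sd (outputData.take kept.length) = kept.map (·.2) := by
    simpa [pvSumsB, hkp] using pvFoldB sd (outputData.take kept.length) [] 0
  rw [hids, hsums]
  rw [show (kept.map (fun x : Int × Int => x.1)).zip (kept.map (fun x : Int × Int => x.2)) = kept from
    Eq.symm (List.zip_of_prod rfl rfl)]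
  rfl
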